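-- pv_equiv track=rewrite | github.com/sakuralggm/algorithm_training | bytedance/统计班级中的说谎者.py | solution
-- ===== SOURCE A (Python) =====
-- import bisect
--
-- def solution(A):
--     A.sort()
--     ans = 0
--     for i in range(len(A)):
--         # 找到第一个大于A[i]的数的下标，用二分的库函数，类似于C++中的lower_bound
--         index = bisect.bisect_left(A, A[i] + 1)
--         if index - 1 >= len(A) - index:
--             ans += 1
--     return ans
-- ===== SOURCE B (Python) =====
-- def solution(A):
--     A.sort()
--     n = len(A)
--     ans = 0
--     le = 0
--     i = 0
--     while i < n:
--         j = i + 1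
--         while j < n and A[j] == A[i]:
--             j += 1
--         f = j - i          # frequency of the run A[i..j)
--         le += f            # elements <= A[i] seen so far
--         if le - 1 >= n - le:
--             ans += f
--         i = j
--     return ans
-- ===== Notes on version B (the rewrite author's own statement) =====
-- stated objective: alternative
-- what changed: Instead of running a binary search (bisect_left) for every element of the sorted list, B makes one cumulative pass over the sorted list grouped into runs of equal values, maintaining a running count le of elements seen so far and adding a whole run's frequency when le - 1 >= n - le; B performs the same in-place sort of the argument.
import Mathlib
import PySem

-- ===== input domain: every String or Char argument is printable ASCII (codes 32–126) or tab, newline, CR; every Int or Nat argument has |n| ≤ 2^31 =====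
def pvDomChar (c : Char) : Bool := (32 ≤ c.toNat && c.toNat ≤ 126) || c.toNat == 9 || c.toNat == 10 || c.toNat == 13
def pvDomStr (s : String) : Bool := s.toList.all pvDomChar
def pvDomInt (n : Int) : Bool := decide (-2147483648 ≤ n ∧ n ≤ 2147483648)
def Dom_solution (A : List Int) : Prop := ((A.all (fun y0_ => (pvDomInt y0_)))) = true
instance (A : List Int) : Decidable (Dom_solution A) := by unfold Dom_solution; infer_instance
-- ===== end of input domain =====

-- B replaces A's per-element binary search with one cumulative pass over the runs of the
-- sorted list (same objective, one accumulator pass); both sort the argument in place, and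
-- the equivalence proved here is about the RETURN value.

-- ===== PORT A =====
def solution (A : List Int) : Int :=
  let S := PySem.List.sorted A (fun x => x)
  S.foldl (fun ans a =>
    let index : Int := (PySem.List.bisectLeft S (a + 1) : Int)
    if index - 1 ≥ (S.length : Int) - index then ans + 1 else ans) 0

-- ===== PORT B =====
-- one pass over the sorted list, run by run (the two index `while` loops of Source B become
-- takeWhile/dropWhile of the current run)
def groupLoop (n : Int) : Int → Int → List Int → Int
  | _,  ans, [] => ans
  | le, ans, v :: rest =>
    let f : Int := 1 + ((rest.takeWhile (fun b => b == v)).length : Int)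
    let le' := le + f
    groupLoop n le' (if le' - 1 ≥ n - le' then ans + f else ans)
      (rest.dropWhile (fun b => b == v))
  termination_by _ _ l => l.length
  decreasing_by
    have := List.length_dropWhile_le (fun b => b == v) rest
    simp only [List.length_cons]
    omega

def solution_alt (A : List Int) : Int :=
  let S := PySem.List.sorted A (fun x => x)
  groupLoop (S.length : Int) 0 0 S

-- ===== PRECONDITION & SPEC =====
def Spec_solution (A : List Int) (out : Int) : Prop := out = solution_alt A
instance (A : List Int) (out : Int) : Decidable (Spec_solution A out) := by unfold Spec_solution; infer_instance

-- ===== CLAIM (what is proved, stated in full; the proofs are below) =====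
def Claim_equal_solution : Prop := ∀ (A : List Int), Dom_solution A → Spec_solution A (solution A)

-- ===== LEMMAS AND PROOFS =====

-- number of elements of T that are ≤ a, shifted by le
def innerCnt (le : Int) (T : List Int) (a : Int) : Int :=
  le + (T.countP (fun b => decide (b ≤ a)) : Int)

-- common form of both programs' answer on a (sorted) list T
def cAns (n le : Int) (T : List Int) : Int :=
  (T.countP (fun a => decide (innerCnt le T a - 1 ≥ n - innerCnt le T a)) : Int)

theorem bisect_eq_countP_lt (S : List Int) (h : S.Pairwise (· ≤ ·)) (x : Int) :
    PySem.List.bisectLeft S x = S.countP (fun b => decide (b < x)) := by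
  obtain ⟨hle, hlt, hge⟩ := PySem.List.bisectLeft_spec S x h
  set k := PySem.List.bisectLeft S x with hk
  conv_rhs => rw [← List.take_append_drop k S]
  rw [List.countP_append]
  have h1 : (S.take k).countP (fun b => decide (b < x)) = (S.take k).length := by
    rw [List.countP_eq_length]
    intro a ha
    obtain ⟨i, hi, rfl⟩ := List.mem_iff_getElem.mp ha
    have hiS : i < S.length := by
      have := hi; simp [List.length_take] at this; omega
    have hik : i < k := by
      have := hi; simp [List.length_take] at this; omega
    rw [List.getElem_take]
    simpa using hlt i hiS hik
  have h2 : (S.drop k).countP (fun b => decide (b < x)) = 0 := by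
    rw [List.countP_eq_zero]
    intro a ha
    obtain ⟨i, hi, rfl⟩ := List.mem_iff_getElem.mp ha
    have hiS : k + i < S.length := by
      have := hi; simp [List.length_drop] at this; omega
    rw [List.getElem_drop]
    have := hge (k + i) hiS (Nat.le_add_right _ _)
    simp; omega
  rw [h1, h2]
  simp [List.length_take]
  omega

theorem solution_eq_cAns (A : List Int) :
    solution A = cAns ((PySem.List.sorted A (fun x => x)).length : Int) 0
      (PySem.List.sorted A (fun x => x)) := by
  unfold solution cAns
  set S := PySem.List.sorted A (fun x => x) with hS
  have hsorted : S.Pairwise (· ≤ ·) := PySem.List.sorted_pairwise A (fun x => x)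
  rw [PySem.List.foldl_ite_add_one
        (fun a => ((PySem.List.bisectLeft S (a + 1) : Int)) - 1 ≥ (S.length : Int) - ((PySem.List.bisectLeft S (a + 1) : Int))) S 0]
  have hcongr : S.countP
      (fun a => decide (((PySem.List.bisectLeft S (a + 1) : Int)) - 1 ≥ (S.length : Int) - ((PySem.List.bisectLeft S (a + 1) : Int))))
      = S.countP (fun a => decide (innerCnt 0 S a - 1 ≥ (S.length : Int) - innerCnt 0 S a)) := by
    apply List.countP_congr
    intro a _
    have hb : PySem.List.bisectLeft S (a + 1) = S.countP (fun b => decide (b ≤ a)) := by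
      rw [bisect_eq_countP_lt S hsorted (a + 1)]
      apply List.countP_congr
      intro b _
      simp only [decide_eq_true_eq]
      omega
    have : (PySem.List.bisectLeft S (a + 1) : Int) = innerCnt 0 S a := by
      rw [hb]; simp [innerCnt]
    rw [this]
  rw [hcongr]
  simp

theorem groupLoop_eq (n : Int) (m : Nat) :
    ∀ (T : List Int), T.length ≤ m → T.Pairwise (· ≤ ·) →
      ∀ le ans, groupLoop n le ans T = ans + cAns n le T := by
  induction m with
  | zero =>
    intro T hlen _ le ans
    have : T = [] := List.length_eq_zero_iff.mp (Nat.le_zero.mp hlen)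
    subst this
    simp [groupLoop, cAns]
  | succ m ih =>
    intro T hlen hsorted le ans
    match T with
    | [] => simp [groupLoop, cAns]
    | v :: rest =>
      set R := rest.takeWhile (fun b => b == v) with hRdef
      set D := rest.dropWhile (fun b => b == v) with hDdef
      have hsplit : v :: rest = (v :: R) ++ D := by
        rw [List.cons_append, hRdef, hDdef, List.takeWhile_append_dropWhile]
      have hvR : ∀ b ∈ v :: R, b = v := by
        intro b hb
        rcases List.mem_cons.mp hb with h | h
        · exact h
        · have := List.mem_takeWhile_imp (hRdef ▸ h)
          simpa using this
      have hrest_ge : ∀ b ∈ rest, v ≤ b := fun b hb => List.rel_of_pairwise_cons hsorted hb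
      have hDsub : ∀ b ∈ D, b ∈ rest := fun b hb =>
        (List.dropWhile_sublist _).subset (hDdef ▸ hb)
      have hDsorted : D.Pairwise (· ≤ ·) :=
        List.Pairwise.sublist (hDdef ▸ List.dropWhile_sublist _) hsorted.of_cons
      have hgt : ∀ b ∈ D, v < b := by
        intro b hb
        rcases hDl : D with _ | ⟨h, t⟩
        · rw [hDl] at hb; simp at hb
        · have hne : rest.dropWhile (fun b => b == v) ≠ [] := by
            rw [← hDdef, hDl]; simp
          have hhead := List.head_dropWhile_not (fun b => b == v) hne
          have hhd : (rest.dropWhile (fun b => b == v)).head hne = h := by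
            simp [← hDdef, hDl]
          rw [hhd] at hhead
          have hhv : h ≠ v := by simpa using hhead
          have hvh : v < h := lt_of_le_of_ne
            (hrest_ge h (hDsub h (hDl ▸ List.mem_cons_self))) (Ne.symm hhv)
          rw [hDl] at hb
          rcases List.mem_cons.mp hb with h' | h'
          · exact h' ▸ hvh
          · have : h ≤ b := List.rel_of_pairwise_cons (hDl ▸ hDsorted) h'
            omega
      have key1 : ((v :: R) ++ D).countP (fun b => decide (b ≤ v)) = R.length + 1 := by
        rw [List.countP_append]
        have h1 : (v :: R).countP (fun b => decide (b ≤ v)) = (v :: R).length := by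
          rw [List.countP_eq_length]
          intro b hb
          have := hvR b hb
          simp [this]
        have h2 : D.countP (fun b => decide (b ≤ v)) = 0 := by
          rw [List.countP_eq_zero]
          intro b hb
          have := hgt b hb
          simp
          omega
        rw [h1, h2]
        simp
      have key2 : ∀ a ∈ D, ((v :: R) ++ D).countP (fun b => decide (b ≤ a)) =
          (R.length + 1) + D.countP (fun b => decide (b ≤ a)) := by
        intro a ha
        rw [List.countP_append]
        have h1 : (v :: R).countP (fun b => decide (b ≤ a)) = (v :: R).length := by
          rw [List.countP_eq_length]
          intro b hb
          have hbv := hvR b hb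
          have := hgt a ha
          simp [hbv]
          omega
        rw [h1]
        simp
      have hgl : groupLoop n le ans (v :: rest) =
          groupLoop n (le + (1 + (R.length : Int)))
            (if (le + (1 + (R.length : Int))) - 1 ≥ n - (le + (1 + (R.length : Int)))
             then ans + (1 + (R.length : Int)) else ans) D := by
        rw [groupLoop]
      have hlenD : D.length ≤ m := by
        have h1 : D.length ≤ rest.length := hDdef ▸ List.length_dropWhile_le _ _
        have h2 : rest.length + 1 ≤ m + 1 := by simpa using hlen
        omega
      rw [hgl, ih D hlenD hDsorted]
      have hcA : cAns n le (v :: rest) =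
          (if (le + (1 + (R.length : Int))) - 1 ≥ n - (le + (1 + (R.length : Int)))
           then ((R.length : Int) + 1) else 0) + cAns n (le + (1 + (R.length : Int))) D := by
        unfold cAns
        rw [hsplit, List.countP_append]
        have hfirst : (v :: R).countP (fun a => decide
            (innerCnt le ((v :: R) ++ D) a - 1 ≥ n - innerCnt le ((v :: R) ++ D) a)) =
            if (le + (1 + (R.length : Int))) - 1 ≥ n - (le + (1 + (R.length : Int)))
            then (v :: R).length else 0 := by
          have hic : innerCnt le ((v :: R) ++ D) v = le + (1 + (R.length : Int)) := by
            unfold innerCnt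
            rw [key1]
            push_cast
            ring
          split_ifs with hc
          · rw [List.countP_eq_length]
            intro a ha
            rw [hvR a ha, hic]
            simpa using hc
          · rw [List.countP_eq_zero]
            intro a ha
            rw [hvR a ha, hic]
            simpa using hc
        have hsecond : D.countP (fun a => decide
            (innerCnt le ((v :: R) ++ D) a - 1 ≥ n - innerCnt le ((v :: R) ++ D) a)) =
            D.countP (fun a => decide
            (innerCnt (le + (1 + (R.length : Int))) D a - 1 ≥
              n - innerCnt (le + (1 + (R.length : Int))) D a)) := by
          apply List.countP_congr
          intro a ha
          have : innerCnt le ((v :: R) ++ D) a = innerCnt (le + (1 + (R.length : Int))) D a := by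
            unfold innerCnt
            rw [key2 a ha]
            push_cast
            ring
          rw [this]
        rw [hfirst, hsecond]
        split_ifs with hc <;> push_cast [List.length_cons] <;> omega
      rw [hcA]
      split_ifs with hc <;> omega

theorem solution_alt_eq_cAns (A : List Int) :
    solution_alt A = cAns ((PySem.List.sorted A (fun x => x)).length : Int) 0
      (PySem.List.sorted A (fun x => x)) := by
  unfold solution_alt
  set S := PySem.List.sorted A (fun x => x) with hS
  have hsorted : S.Pairwise (· ≤ ·) := PySem.List.sorted_pairwise A (fun x => x)
  have := groupLoop_eq ((S.length : Int)) S.length S le_rfl hsorted 0 0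
  simpa using this

-- ===== VERDICT (by name: the statement is the Claim_ definition above) =====
theorem solution_spec : Claim_equal_solution := by
  intro A _
  unfold Spec_solution
  rw [solution_eq_cAns, solution_alt_eq_cAns]
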